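-- pv_equiv track=rewrite | github.com/eminemahjoub/Cyber-SOC-Auto-Responder | agents/triage_agent.py | _has_suspicious_file_extension
-- ===== SOURCE A (Python) =====
-- from typing import Dict, List, Optional, Any, Tuple
--
-- def _has_suspicious_file_extension(alert_data: Dict[str, Any]) -> bool:
--     """Check for suspicious file extensions"""
--     file_path = alert_data.get("file_path", "")
--     if not file_path:
--         return False
--
--     suspicious_extensions = {
--         ".exe", ".bat", ".cmd", ".scr", ".pif", ".com",
--         ".js", ".jse", ".vbs", ".vbe", ".ps1", ".wsf"
--     }
--
--     return any(file_path.lower().endswith(ext) for ext in suspicious_extensions)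
-- ===== SOURCE B (Python) =====
-- def _has_suspicious_file_extension(alert_data) -> bool:
--     """Check for suspicious file extensions"""
--     file_path = alert_data.get("file_path", "")
--     if not file_path:
--         return False
--
--     suspicious_extensions = {
--         ".exe", ".bat", ".cmd", ".scr", ".pif", ".com",
--         ".js", ".jse", ".vbs", ".vbe", ".ps1", ".wsf"
--     }
--
--     lowered = file_path.lower()
--     if "." not in lowered:
--         return False
--     return "." + lowered.rsplit(".", 1)[-1] in suspicious_extensions
-- ===== Notes on version B (the rewrite author's own statement) =====
-- stated objective: idiomatic
-- what changed: Replaces A's any-endswith scan over all 12 suspicious extensions with computing the lower-cased path's extension once (the dot plus the segment after the last dot, guarded by a dot-containment check) and doing a single set-membership lookup.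
import Mathlib
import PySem

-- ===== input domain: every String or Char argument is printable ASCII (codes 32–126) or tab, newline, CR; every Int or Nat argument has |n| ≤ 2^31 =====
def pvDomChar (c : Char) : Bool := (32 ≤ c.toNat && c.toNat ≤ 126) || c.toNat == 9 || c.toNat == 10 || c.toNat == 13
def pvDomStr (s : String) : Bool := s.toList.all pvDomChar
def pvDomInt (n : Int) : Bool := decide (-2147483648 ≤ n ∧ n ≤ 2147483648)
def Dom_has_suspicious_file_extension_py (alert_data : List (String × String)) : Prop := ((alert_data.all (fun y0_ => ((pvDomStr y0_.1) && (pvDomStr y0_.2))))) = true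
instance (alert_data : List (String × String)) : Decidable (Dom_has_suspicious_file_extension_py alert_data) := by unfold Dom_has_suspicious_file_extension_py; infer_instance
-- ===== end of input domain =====

-- B computes the lower-cased path's extension once (suffix after the last '.') and tests set membership,
-- instead of A's any(...endswith...) scan over all 12 extensions; objective: idiomatic/alternative, not claimed faster.


-- ===== PORT A =====
-- the Python set literal of suspicious extensions, shared by both ports (consumed only by order-independent any/membership)
def suspExtsA : List String :=
  PySem.Set.ofList [".exe", ".bat", ".cmd", ".scr", ".pif", ".com",
                    ".js", ".jse", ".vbs", ".vbe", ".ps1", ".wsf"]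

def has_suspicious_file_extension_py (alert_data : List (String × String)) : Bool :=
  let file_path := (PySem.Dict.ofList alert_data).getD "file_path" ""
  if file_path = "" then false
  else suspExtsA.any (fun ext => PySem.Str.endswith (PySem.Str.lower file_path) ext)

-- ===== PORT B =====
-- hand port of lowered.rsplit(".", 1)[-1]: the suffix after the LAST '.' (exact; whole string if no '.',
-- but B only uses it when a '.' is present)
def lastDotSuffix (cs : List Char) : List Char :=
  (cs.reverse.takeWhile (fun c => c ≠ '.')).reverse

def has_suspicious_file_extension_py_alt (alert_data : List (String × String)) : Bool :=
  let file_path := (PySem.Dict.ofList alert_data).getD "file_path" ""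
  if file_path = "" then false
  else
    let lowered := PySem.Chars.lower file_path.toList
    if PySem.Chars.isIn ['.'] lowered then
      suspExtsA.contains (String.ofList ('.' :: lastDotSuffix lowered))
    else false

-- ===== PRECONDITION & SPEC =====
def Spec_has_suspicious_file_extension_py (alert_data : List (String × String)) (out : Bool) : Prop := out = has_suspicious_file_extension_py_alt alert_data
instance (alert_data : List (String × String)) (out : Bool) : Decidable (Spec_has_suspicious_file_extension_py alert_data out) := by unfold Spec_has_suspicious_file_extension_py; infer_instance

-- ===== CLAIM (what is proved, stated in full; the proofs are below) =====
def Claim_equal_has_suspicious_file_extension_py : Prop := ∀ (alert_data : List (String × String)), Dom_has_suspicious_file_extension_py alert_data → Spec_has_suspicious_file_extension_py alert_data (has_suspicious_file_extension_py alert_data)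

-- ===== LEMMAS AND PROOFS =====

-- (ds ++ ['.']) is a prefix of r iff r contains a '.' and its dot-free head is exactly ds
lemma prefix_dot_iff_takeWhile (r ds : List Char) (h : '.' ∉ ds) :
    (ds ++ ['.']) <+: r ↔ ('.' ∈ r ∧ r.takeWhile (fun c => c ≠ '.') = ds) := by
  induction ds generalizing r with
  | nil =>
    cases r with
    | nil => simp
    | cons a t =>
      by_cases ha : a = '.'
      · subst ha; simp
      · simp [List.cons_prefix_cons, ha, Ne.symm ha]
  | cons d ds ih =>
    have hd : d ≠ '.' := by simp at h; exact fun hh => h.1 hh.symm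
    have hds : '.' ∉ ds := by simp at h; exact fun hx => h.2 hx
    cases r with
    | nil => simp
    | cons a t =>
      by_cases ha : a = d
      · subst ha
        simp only [List.cons_append, List.cons_prefix_cons, true_and]
        rw [ih t hds]
        simp [hd, List.mem_cons, Ne.symm hd]
      · constructor
        · intro hp
          exact absurd (List.cons_prefix_cons.mp hp).1 (Ne.symm ha)
        · rintro ⟨-, htw⟩
          by_cases hadot : a = '.'
          · subst hadot; simp at htw
          · simp [hadot] at htw
            exact absurd htw.1 ha

-- '.'::cs is a suffix of lp iff lp contains '.' and its last-dot suffix is cs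
lemma suffix_dot_iff (lp cs : List Char) (h : '.' ∉ cs) :
    ('.' :: cs) <:+ lp ↔ ('.' ∈ lp ∧ lastDotSuffix lp = cs) := by
  rw [← List.reverse_prefix]
  have : ('.' :: cs).reverse = cs.reverse ++ ['.'] := by simp
  rw [this, prefix_dot_iff_takeWhile lp.reverse cs.reverse (by simpa using h)]
  unfold lastDotSuffix
  constructor
  · rintro ⟨hm, htw⟩
    refine ⟨by simpa using hm, ?_⟩
    rw [htw]; simp
  · rintro ⟨hm, hls⟩
    refine ⟨by simpa using hm, ?_⟩
    have := congrArg List.reverse hls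
    simpa using this

-- the core equivalence: any-endswith over the extension set equals the single derived-key lookup
lemma any_endswith_eq (lp : List Char) :
    suspExtsA.any (fun e => PySem.Chars.endswith lp e.toList) =
    (if PySem.Chars.isIn ['.'] lp then
       suspExtsA.contains (String.ofList ('.' :: lastDotSuffix lp))
     else false) := by
  have hsh : ∀ e ∈ suspExtsA, e.toList.head? = some '.' ∧ '.' ∉ e.toList.tail := by decide
  have hdecomp : ∀ e ∈ suspExtsA, ∃ cs, e.toList = '.' :: cs ∧ '.' ∉ cs := by
    intro e he
    obtain ⟨h1, h2⟩ := hsh e he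
    cases hts : e.toList with
    | nil => rw [hts] at h1; simp at h1
    | cons a t =>
      rw [hts] at h1 h2
      simp at h1
      exact ⟨t, by rw [h1], by simpa using h2⟩
  have hmem : PySem.Chars.isIn ['.'] lp = true ↔ '.' ∈ lp := by
    rw [PySem.Chars.isIn_iff_infix]
    constructor
    · rintro ⟨s, t, hst⟩; rw [← hst]; simp
    · intro hm
      obtain ⟨s, t, hst⟩ := List.append_of_mem hm
      exact ⟨s, t, by simp [hst]⟩
  by_cases hdot : '.' ∈ lp
  · rw [if_pos (hmem.mpr hdot)]
    rw [Bool.eq_iff_iff]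
    simp only [List.any_eq_true, List.contains_iff_mem]
    constructor
    · rintro ⟨e, he, hend⟩
      obtain ⟨cs, hcs, hnd⟩ := hdecomp e he
      rw [PySem.Chars.endswith_iff, hcs, suffix_dot_iff lp cs hnd] at hend
      have he2 : String.ofList ('.' :: lastDotSuffix lp) = e := by
        rw [hend.2, ← hcs]
        exact String.ofList_toList
      rw [he2]; exact he
    · intro hm
      refine ⟨_, hm, ?_⟩
      obtain ⟨cs, hcs, hnd⟩ := hdecomp _ hm
      rw [PySem.Chars.endswith_iff, hcs, suffix_dot_iff lp cs hnd]
      have htl : (String.ofList ('.' :: lastDotSuffix lp)).toList = '.' :: lastDotSuffix lp :=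
        String.toList_ofList
      have h3 : '.' :: cs = '.' :: lastDotSuffix lp := hcs.symm.trans htl
      injection h3 with _ h4
      exact ⟨hdot, h4.symm⟩
  · rw [if_neg (by simp [hmem, hdot])]
    rw [List.any_eq_false]
    intro e he
    obtain ⟨cs, hcs, hnd⟩ := hdecomp e he
    simp only [Bool.not_eq_true]
    rw [← Bool.not_eq_true, PySem.Chars.endswith_iff, hcs, suffix_dot_iff lp cs hnd]
    exact fun hc => hdot hc.1

-- ===== VERDICT (by name: the statement is the Claim_ definition above) =====
theorem has_suspicious_file_extension_py_spec : Claim_equal_has_suspicious_file_extension_py := by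
  intro alert_data _
  unfold Spec_has_suspicious_file_extension_py
  unfold has_suspicious_file_extension_py has_suspicious_file_extension_py_alt
  by_cases hfp : (PySem.Dict.ofList alert_data).getD "file_path" "" = ""
  · simp [hfp]
  · rw [if_neg hfp, if_neg hfp]
    simp only [PySem.Str.endswith_eq, PySem.Str.toList_lower]
    exact any_endswith_eq (PySem.Chars.lower ((PySem.Dict.ofList alert_data).getD "file_path" "").toList)
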